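-- pv_equiv track=rewrite | github.com/dguo456/jiuzhang | BFS/258 · Map Jump.py | can_reach_target
-- ===== SOURCE A (Python) =====
-- from collections import deque
--
-- DIRECTIONS = [(-1, 0), (0, -1), (1, 0), (0, 1)]
--
-- def can_reach_target(arr, target):
--     queue = deque([(0, 0)])
--     visited = set((0, 0))
--
--     while queue:
--         x, y = queue.popleft()
--         height = arr[x][y]
--
--         if x == len(arr) - 1 and y == len(arr[0]) - 1:
--             return True
--
--         for dx, dy in DIRECTIONS:
--             next_x, next_y = x + dx, y + dy
--             if not (0 <= next_x < len(arr) and 0 <= next_y < len(arr[0])):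
--                 continue
--             if (next_x, next_y) in visited:
--                 continue
--             if abs(height - arr[next_x][next_y]) > target:
--                 continue
--
--             queue.append((next_x, next_y))
--             visited.add((next_x, next_y))
--
--     return False
-- ===== SOURCE B (Python) =====
-- def can_reach_target(arr, target):
--     # Fixed-point (round-based) relaxation over the whole grid: repeatedly sweep
--     # all cells, marking any cell adjacent to an already-reachable cell with
--     # height difference <= target, until a sweep adds nothing.  No queue/frontier.
--     rows, cols = len(arr), len(arr[0])
--     reach = {(0, 0)}
--     changed = True
--     while changed:
--         changed = False
--         for x in range(rows):
--             for y in range(cols):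
--                 if (x, y) in reach:
--                     continue
--                 h = arr[x][y]
--                 for nx, ny in ((x - 1, y), (x + 1, y), (x, y - 1), (x, y + 1)):
--                     if 0 <= nx < rows and 0 <= ny < cols and (nx, ny) in reach \
--                             and abs(arr[nx][ny] - h) <= target:
--                         reach.add((x, y))
--                         changed = True
--                         break
--     return (rows - 1, cols - 1) in reach
-- ===== Notes on version B (the rewrite author's own statement) =====
-- stated objective: alternative
-- what changed: Replaces A's BFS queue/frontier with round-based fixed-point relaxation: repeated full-grid sweeps mark any cell adjacent (height gap <= target) to an already-reachable cell until a sweep adds nothing, then one membership query for the goal cell.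
-- outside the precondition, e.g. on can_reach_target([[0, 5], [100]], 0): A returns False, B raises IndexError; on can_reach_target([[0, 0], [0]], 0): A raises IndexError, B raises IndexError; on can_reach_target([], 0): A raises IndexError, B raises IndexError
import Mathlib
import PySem

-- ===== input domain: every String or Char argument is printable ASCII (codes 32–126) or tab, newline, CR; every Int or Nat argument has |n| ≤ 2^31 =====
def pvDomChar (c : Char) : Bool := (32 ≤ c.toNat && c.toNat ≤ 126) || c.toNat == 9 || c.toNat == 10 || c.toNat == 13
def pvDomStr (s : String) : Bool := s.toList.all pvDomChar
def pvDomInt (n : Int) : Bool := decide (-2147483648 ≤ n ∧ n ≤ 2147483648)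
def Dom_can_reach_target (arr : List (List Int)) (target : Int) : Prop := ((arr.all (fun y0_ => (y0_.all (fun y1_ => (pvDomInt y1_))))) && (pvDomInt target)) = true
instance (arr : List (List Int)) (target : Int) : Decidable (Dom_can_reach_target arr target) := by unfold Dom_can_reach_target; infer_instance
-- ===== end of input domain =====

-- B replaces A's BFS queue/frontier by whole-grid fixed-point sweeps (relaxation until no
-- sweep adds a cell): an alternative algorithm, not claimed faster.

-- ===== PORT A =====

-- arr[x][y]; exact for the in-bounds accesses both programs make under Pre_
def pvGet (arr : List (List Int)) (x y : Int) : Int :=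
  (PySem.List.pyGet? ((PySem.List.pyGet? arr x).getD []) y).getD 0

def DIRECTIONS : List (Int × Int) := [(-1, 0), (0, -1), (1, 0), (0, 1)]

-- body of A's `for dx, dy in DIRECTIONS` loop (the three `continue`s, then push+mark)
def bfs_step (arr : List (List Int)) (target x y height : Int)
    (st : List (Int × Int) × PySem.Set (Int × Int)) (d : Int × Int) :
    List (Int × Int) × PySem.Set (Int × Int) :=
  let nx := x + d.1
  let ny := y + d.2
  if ¬ (0 ≤ nx ∧ nx < (arr.length : Int) ∧ 0 ≤ ny ∧ ny < ((arr.headD []).length : Int)) then st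
  else if PySem.Set.contains st.2 (nx, ny) then st
  else if |height - pvGet arr nx ny| > target then st
  else (st.1 ++ [(nx, ny)], PySem.Set.add st.2 (nx, ny))

-- A's `while queue` loop; fuel 2*n*m+2 always suffices under Pre_ (proved below)
def bfs_loop (arr : List (List Int)) (target : Int) (fuel : Nat)
    (queue : List (Int × Int)) (visited : PySem.Set (Int × Int)) : Bool :=
  match fuel, queue with
  | 0, _ => false
  | _ + 1, [] => false
  | fuel + 1, (x, y) :: rest =>
      let height := pvGet arr x y
      if x = (arr.length : Int) - 1 ∧ y = ((arr.headD []).length : Int) - 1 then true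
      else
        let st := DIRECTIONS.foldl (bfs_step arr target x y height) (rest, visited)
        bfs_loop arr target fuel st.1 st.2

def can_reach_target (arr : List (List Int)) (target : Int) : Bool :=
  -- Python's `set((0, 0))` is `{0}` (the set of the tuple's ELEMENTS, not of the tuple);
  -- the int 0 never equals a coordinate pair, so as a set of cells it is exactly ∅.
  bfs_loop arr target (2 * (arr.length * (arr.headD []).length) + 2)
    [((0 : Int), (0 : Int))] PySem.Set.empty

-- ===== PORT B =====

def nbrs (x y : Int) : List (Int × Int) := [(x - 1, y), (x + 1, y), (x, y - 1), (x, y + 1)]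

-- body of B's innermost cell step; Python's `for …: if …: add; break` adds (x,y)
-- exactly once iff SOME neighbour qualifies, i.e. `any`
def sweep_cell (arr : List (List Int)) (target rows cols : Int)
    (st : PySem.Set (Int × Int) × Bool) (x y : Int) : PySem.Set (Int × Int) × Bool :=
  if PySem.Set.contains st.1 (x, y) then st
  else if (nbrs x y).any (fun n =>
      decide (0 ≤ n.1 ∧ n.1 < rows ∧ 0 ≤ n.2 ∧ n.2 < cols) &&
      PySem.Set.contains st.1 n &&
      decide (|pvGet arr n.1 n.2 - pvGet arr x y| ≤ target))
  then (PySem.Set.add st.1 (x, y), true) else st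

-- one full sweep over all cells (B's nested `for x… for y…` with the `changed` flag)
def sweep (arr : List (List Int)) (target rows cols : Int) (S : PySem.Set (Int × Int)) :
    PySem.Set (Int × Int) × Bool :=
  (PySem.List.pyRange 0 rows 1).foldl
    (fun st x => (PySem.List.pyRange 0 cols 1).foldl
      (fun st' y => sweep_cell arr target rows cols st' x y) st)
    (S, false)

-- B's `while changed` loop; at most n*m sweeps can add a cell, so fuel n*m+1 suffices
def sweep_loop (arr : List (List Int)) (target rows cols : Int) (fuel : Nat)
    (S : PySem.Set (Int × Int)) : PySem.Set (Int × Int) :=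
  match fuel with
  | 0 => S
  | fuel + 1 =>
      let r := sweep arr target rows cols S
      if r.2 then sweep_loop arr target rows cols fuel r.1 else r.1

def can_reach_target_alt (arr : List (List Int)) (target : Int) : Bool :=
  let rows : Int := arr.length
  let cols : Int := (arr.headD []).length
  let R := sweep_loop arr target rows cols (arr.length * (arr.headD []).length + 1)
      (PySem.Set.add PySem.Set.empty ((0 : Int), (0 : Int)))
  PySem.Set.contains R (rows - 1, cols - 1)

-- ===== PRECONDITION & SPEC =====
-- Pre_ keeps the task's natural domain — nonempty grids whose rows all have at least the
-- first row's length (the grid is the first len(arr[0]) columns): on an empty arr / empty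
-- first row A raises IndexError immediately, and when some row is shorter than the first,
-- A either raises IndexError too or returns a value only because its BFS happens never to
-- reach the missing cells, while B's whole-grid sweeps raise IndexError there.
def Pre_can_reach_target (arr : List (List Int)) (target : Int) : Prop :=
  arr ≠ [] ∧ arr.headD [] ≠ [] ∧ ∀ row ∈ arr, (arr.headD []).length ≤ row.length
instance (arr : List (List Int)) (target : Int) : Decidable (Pre_can_reach_target arr target) := by
  unfold Pre_can_reach_target; infer_instance
def pvWitness_can_reach_target : List (List Int) × Int := ([[0, 1], [2, 3]], 5)

def Spec_can_reach_target (arr : List (List Int)) (target : Int) (out : Bool) : Prop := out = can_reach_target_alt arr target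
instance (arr : List (List Int)) (target : Int) (out : Bool) : Decidable (Spec_can_reach_target arr target out) := by unfold Spec_can_reach_target; infer_instance

-- ===== CLAIM (what is proved, stated in full; the proofs are below) =====
def Claim_equal_can_reach_target : Prop := ∀ (arr : List (List Int)) (target : Int), Dom_can_reach_target arr target → Pre_can_reach_target arr target → Spec_can_reach_target arr target (can_reach_target arr target)

-- ===== LEMMAS AND PROOFS =====

-- the common graph: cells of the n×m rectangle, edges = unit steps with height gap ≤ target
def InGrid (arr : List (List Int)) (c : Int × Int) : Prop :=
  0 ≤ c.1 ∧ c.1 < (arr.length : Int) ∧ 0 ≤ c.2 ∧ c.2 < ((arr.headD []).length : Int)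

def EdgeP (arr : List (List Int)) (target : Int) (u v : Int × Int) : Prop :=
  InGrid arr u ∧ InGrid arr v ∧ (v.1 - u.1, v.2 - u.2) ∈ DIRECTIONS ∧
    |pvGet arr u.1 u.2 - pvGet arr v.1 v.2| ≤ target

def ReachP (arr : List (List Int)) (target : Int) (c : Int × Int) : Prop :=
  Relation.ReflTransGen (EdgeP arr target) ((0 : Int), (0 : Int)) c

lemma reach_subset (arr : List (List Int)) (target : Int) (V : List (Int × Int))
    (h0 : ((0 : Int), (0 : Int)) ∈ V)
    (hcl : ∀ u v, u ∈ V → EdgeP arr target u v → v ∈ V) :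
    ∀ c, ReachP arr target c → c ∈ V := by
  intro c hc
  induction hc with
  | refl => exact h0
  | tail _ e ih => exact hcl _ _ ih e

lemma nodup_snoc {α : Type} (V : List α) (w : α) (hnd : V.Nodup) (hw : w ∉ V) :
    (V ++ [w]).Nodup := by
  rw [List.nodup_append_comm]
  exact List.nodup_cons.mpr ⟨hw, hnd⟩

lemma mem_nbrs (u : Int × Int) (x y : Int) :
    u ∈ nbrs x y ↔ (x - u.1, y - u.2) ∈ DIRECTIONS := by
  obtain ⟨a, b⟩ := u
  simp [nbrs, DIRECTIONS, Prod.ext_iff]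
  omega

def gridList (R C : Nat) : List (Int × Int) :=
  ((List.range R) ×ˢ (List.range C)).map (fun p => ((p.1 : Int), (p.2 : Int)))

lemma mem_gridList {R C : Nat} {c : Int × Int} (arr : List (List Int))
    (hR : R = arr.length) (hC : C = (arr.headD []).length) :
    c ∈ gridList R C ↔ InGrid arr c := by
  obtain ⟨a, b⟩ := c
  subst hR hC
  simp only [gridList, List.mem_map]
  constructor
  · rintro ⟨⟨i, j⟩, hij, h⟩
    simp only [SProd.sprod, List.pair_mem_product, List.mem_range] at hij
    cases h
    simp only [InGrid]
    omega
  · intro h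
    obtain ⟨h1, h2, h3, h4⟩ := h
    refine ⟨(a.toNat, b.toNat), ?_, ?_⟩
    · simp only [SProd.sprod, List.pair_mem_product, List.mem_range]
      omega
    · simp only [Prod.ext_iff]
      omega

lemma length_le_grid (arr : List (List Int)) (V : List (Int × Int)) (hnd : V.Nodup)
    (hsub : ∀ c ∈ V, InGrid arr c) :
    V.length ≤ arr.length * (arr.headD []).length := by
  have h := (List.Nodup.subperm hnd
    (fun c hc => (mem_gridList arr rfl rfl).mpr (hsub c hc))).length_le
  simpa [gridList, List.length_product] using h

-- ---------- A side ----------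

lemma fold_bfs_step (arr : List (List Int)) (target x y : Int)
    (hxy : InGrid arr (x, y)) :
    ∀ (ds : List (Int × Int)), ds ⊆ DIRECTIONS → ∀ (q V : List (Int × Int)),
    ∃ new,
      List.foldl (bfs_step arr target x y (pvGet arr x y)) (q, V) ds = (q ++ new, V ++ new) ∧
      (V.Nodup → (V ++ new).Nodup) ∧
      (∀ w ∈ new, InGrid arr w ∧ EdgeP arr target (x, y) w) ∧
      (∀ d ∈ ds, EdgeP arr target (x, y) (x + d.1, y + d.2) → (x + d.1, y + d.2) ∈ V ++ new) := by
  intro ds hds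
  induction ds with
  | nil =>
    intro q V
    exact ⟨[], by simp, fun h => by simpa using h, by simp, by simp⟩
  | cons d ds ih =>
    intro q V
    have hd : d ∈ DIRECTIONS := hds (List.mem_cons_self ..)
    have hds' : ds ⊆ DIRECTIONS := fun z hz => hds (List.mem_cons_of_mem _ hz)
    by_cases hb : (0 ≤ x + d.1 ∧ x + d.1 < (arr.length : Int) ∧ 0 ≤ y + d.2 ∧
        y + d.2 < ((arr.head?.getD []).length : Int))
    · by_cases hc : (x + d.1, y + d.2) ∈ V
      · have hstep : bfs_step arr target x y (pvGet arr x y) (q, V) d = (q, V) := by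
          simp [bfs_step, hb, hc]
        obtain ⟨new, h1, h2, h3, h4⟩ := ih hds' q V
        refine ⟨new, by simpa [List.foldl_cons, hstep] using h1, h2, h3, ?_⟩
        intro d' hd' he
        rcases List.mem_cons.mp hd' with rfl | hmem
        · exact List.mem_append_left _ hc
        · exact h4 d' hmem he
      · by_cases ha : |pvGet arr x y - pvGet arr (x + d.1) (y + d.2)| > target
        · have hstep : bfs_step arr target x y (pvGet arr x y) (q, V) d = (q, V) := by
            simp [bfs_step, hb, hc, ha]
          obtain ⟨new, h1, h2, h3, h4⟩ := ih hds' q V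
          refine ⟨new, by simpa [List.foldl_cons, hstep] using h1, h2, h3, ?_⟩
          intro d' hd' he
          rcases List.mem_cons.mp hd' with rfl | hmem
          · exact absurd he.2.2.2 (by simpa using ha)
          · exact h4 d' hmem he
        · have hstep : bfs_step arr target x y (pvGet arr x y) (q, V) d =
              (q ++ [(x + d.1, y + d.2)], V ++ [(x + d.1, y + d.2)]) := by
            simp [bfs_step, hb, hc, ha, PySem.Set.add]
          have hwV : (x + d.1, y + d.2) ∉ V := hc
          have hwGrid : InGrid arr (x + d.1, y + d.2) := by simpa [InGrid] using hb
          have hwEdge : EdgeP arr target (x, y) (x + d.1, y + d.2) := by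
            refine ⟨hxy, hwGrid, ?_, by simpa using not_lt.mp ha⟩
            have : ((x + d.1, y + d.2).1 - x, (x + d.1, y + d.2).2 - y) = d := by
              simp
            rwa [this]
          obtain ⟨new, h1, h2, h3, h4⟩ :=
            ih hds' (q ++ [(x + d.1, y + d.2)]) (V ++ [(x + d.1, y + d.2)])
          refine ⟨(x + d.1, y + d.2) :: new, ?_, ?_, ?_, ?_⟩
          · rw [List.foldl_cons, hstep, h1]
            simp
          · intro hnd
            have hnd' : (V ++ [(x + d.1, y + d.2)]).Nodup := nodup_snoc _ _ hnd hwV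
            have := h2 hnd'
            simpa using this
          · intro w hw
            rcases List.mem_cons.mp hw with rfl | hmem
            · exact ⟨hwGrid, hwEdge⟩
            · exact h3 w hmem
          · intro d' hd' he
            rcases List.mem_cons.mp hd' with rfl | hmem
            · simp
            · have := h4 d' hmem he
              simpa using this
    · have hstep : bfs_step arr target x y (pvGet arr x y) (q, V) d = (q, V) := by
        simp [bfs_step, hb]
      obtain ⟨new, h1, h2, h3, h4⟩ := ih hds' q V
      refine ⟨new, by simpa [List.foldl_cons, hstep] using h1, h2, h3, ?_⟩
      intro d' hd' he
      rcases List.mem_cons.mp hd' with rfl | hmem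
      · exact absurd he.2.1 (by simpa [InGrid] using hb)
      · exact h4 d' hmem he

def goalCell (arr : List (List Int)) : Int × Int :=
  ((arr.length : Int) - 1, ((arr.headD []).length : Int) - 1)

def InvA (arr : List (List Int)) (target : Int) (queue V : List (Int × Int)) : Prop :=
  V.Nodup ∧
  (∀ c ∈ V, InGrid arr c ∧ ReachP arr target c) ∧
  (∀ c ∈ queue, c ∈ V ∨ c = ((0 : Int), (0 : Int))) ∧
  (∀ v, (v ∈ V ∨ v = ((0 : Int), (0 : Int))) → v ∉ queue →
      ∀ w, EdgeP arr target v w → w ∈ V) ∧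
  ((goalCell arr ∈ V ∨ goalCell arr = ((0 : Int), (0 : Int))) → goalCell arr ∈ queue)

lemma bfs_loop_correct (arr : List (List Int)) (target : Int)
    (hR : 0 < arr.length) (hC : 0 < (arr.headD []).length) :
    ∀ (fuel : Nat) (queue V : List (Int × Int)), InvA arr target queue V →
      queue.length + 2 * (arr.length * (arr.headD []).length - V.length) < fuel →
      (bfs_loop arr target fuel queue V = true ↔ ReachP arr target (goalCell arr)) := by
  intro fuel
  induction fuel with
  | zero => intro queue V _ hmu; omega
  | succ fuel ih =>
    intro queue V hinv hmu
    obtain ⟨hnd, hV, hq, hcl, hgoal⟩ := hinv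
    cases queue with
    | nil =>
      have hfalse : bfs_loop arr target (fuel + 1) [] V = false := by simp [bfs_loop]
      rw [hfalse]
      simp only [Bool.false_eq_true, false_iff]
      intro hreach
      have hsub := reach_subset arr target (((0 : Int), (0 : Int)) :: V)
        (List.mem_cons_self ..)
        (fun u v hu he => by
          have hu' : u ∈ V ∨ u = ((0 : Int), (0 : Int)) := by
            rcases List.mem_cons.mp hu with h | h
            · exact Or.inr h
            · exact Or.inl h
          exact List.mem_cons_of_mem _ (hcl u hu' (List.not_mem_nil) v he))
        _ hreach
      rcases List.mem_cons.mp hsub with h | h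
      · exact absurd (hgoal (Or.inr h)) (List.not_mem_nil)
      · exact absurd (hgoal (Or.inl h)) (List.not_mem_nil)
    | cons c rest =>
      obtain ⟨x, y⟩ := c
      have hcmem : (x, y) ∈ V ∨ (x, y) = ((0 : Int), (0 : Int)) :=
        hq _ (List.mem_cons_self ..)
      have hcGrid : InGrid arr (x, y) := by
        rcases hcmem with h | h
        · exact (hV _ h).1
        · rw [h]
          refine ⟨le_refl 0, ?_, le_refl 0, ?_⟩
          · change (0 : Int) < (arr.length : Int)
            exact_mod_cast hR
          · change (0 : Int) < ((arr.headD []).length : Int)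
            exact_mod_cast hC
      have hcReach : ReachP arr target (x, y) := by
        rcases hcmem with h | h
        · exact (hV _ h).2
        · rw [h]
          exact Relation.ReflTransGen.refl
      by_cases hg : (x = (arr.length : Int) - 1 ∧ y = ((arr.headD []).length : Int) - 1)
      · have htrue : bfs_loop arr target (fuel + 1) ((x, y) :: rest) V = true := by
          simp [bfs_loop, hg]
        rw [htrue]
        simp only [true_iff]
        have : (x, y) = goalCell arr := by
          simp only [goalCell, hg.1, hg.2]
        rwa [← this]
      · obtain ⟨new, hfold, hnd', hnew, hcov⟩ :=
          fold_bfs_step arr target x y hcGrid DIRECTIONS (List.Subset.refl _) rest V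
        have hloop : bfs_loop arr target (fuel + 1) ((x, y) :: rest) V =
            bfs_loop arr target fuel (rest ++ new) (V ++ new) := by
          simp only [bfs_loop]
          rw [if_neg hg, hfold]
        rw [hloop]
        have hV' : ∀ c ∈ V ++ new, InGrid arr c ∧ ReachP arr target c := by
          intro c hc
          rcases List.mem_append.mp hc with h | h
          · exact hV _ h
          · exact ⟨(hnew _ h).1, Relation.ReflTransGen.tail hcReach (hnew _ h).2⟩
        have hgoalne : goalCell arr ≠ (x, y) := by
          intro hgeq
          apply hg
          have h1 := congrArg Prod.fst hgeq
          have h2 := congrArg Prod.snd hgeq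
          simp only [goalCell] at h1 h2
          exact ⟨h1.symm, h2.symm⟩
        apply ih
        · refine ⟨hnd' hnd, hV', ?_, ?_, ?_⟩
          · intro c hc
            rcases List.mem_append.mp hc with h | h
            · rcases hq c (List.mem_cons_of_mem _ h) with h' | h'
              · exact Or.inl (List.mem_append_left _ h')
              · exact Or.inr h'
            · exact Or.inl (List.mem_append_right _ h)
          · intro v hv hnotin w' he
            by_cases hvc : v = (x, y)
            · subst hvc
              have hdmem : (w'.1 - x, w'.2 - y) ∈ DIRECTIONS := he.2.2.1
              have hw'eq : (x + (w'.1 - x), y + (w'.2 - y)) = w' := by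
                obtain ⟨w1, w2⟩ := w'
                simp only [Prod.mk.injEq]
                constructor <;> ring
              have := hcov (w'.1 - x, w'.2 - y) hdmem (by rwa [hw'eq])
              rwa [hw'eq] at this
            · rcases hv with hv | hv
              · rcases List.mem_append.mp hv with h | h
                · have hvnot : v ∉ (x, y) :: rest := by
                    intro hmem
                    rcases List.mem_cons.mp hmem with h' | h'
                    · exact hvc h'
                    · exact hnotin (List.mem_append_left _ h')
                  exact List.mem_append_left _ (hcl v (Or.inl h) hvnot w' he)
                · exact absurd (List.mem_append_right _ h) hnotin
              · have hvnot : v ∉ (x, y) :: rest := by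
                  intro hmem
                  rcases List.mem_cons.mp hmem with h' | h'
                  · exact hvc h'
                  · exact hnotin (List.mem_append_left _ h')
                exact List.mem_append_left _ (hcl v (Or.inr hv) hvnot w' he)
          · intro hgm
            rcases hgm with hgm | hgm
            · rcases List.mem_append.mp hgm with h | h
              · have := hgoal (Or.inl h)
                rcases List.mem_cons.mp this with h' | h'
                · exact absurd h' hgoalne
                · exact List.mem_append_left _ h'
              · exact List.mem_append_right _ h
            · have := hgoal (Or.inr hgm)
              rcases List.mem_cons.mp this with h' | h'
              · exact absurd h' hgoalne
              · exact List.mem_append_left _ h'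
        · have hbound : (V ++ new).length ≤ arr.length * (arr.headD []).length :=
            length_le_grid arr (V ++ new) (hnd' hnd) (fun c hc => (hV' c hc).1)
          have hlen : (V ++ new).length = V.length + new.length := List.length_append ..
          have hlen2 : (rest ++ new).length = rest.length + new.length := List.length_append ..
          simp only [List.length_cons] at hmu
          omega

-- ---------- B side ----------

lemma sweep_cell_push (arr : List (List Int)) (target : Int)
    (st : PySem.Set (Int × Int) × Bool) (x y : Int) (hxy : InGrid arr (x, y)) :
    sweep_cell arr target (arr.length : Int) ((arr.headD []).length : Int) st x y = st ∨
    ((x, y) ∉ st.1 ∧ (∃ u ∈ st.1, EdgeP arr target u (x, y)) ∧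
      sweep_cell arr target (arr.length : Int) ((arr.headD []).length : Int) st x y
        = (st.1 ++ [(x, y)], true)) := by
  obtain ⟨S, b⟩ := st
  by_cases hmem : (x, y) ∈ S
  · left
    unfold sweep_cell
    rw [if_pos ((PySem.Set.contains_iff ..).mpr hmem)]
  · by_cases hany : ((nbrs x y).any (fun n =>
        decide (0 ≤ n.1 ∧ n.1 < (arr.length : Int) ∧ 0 ≤ n.2 ∧
          n.2 < ((arr.headD []).length : Int)) &&
        PySem.Set.contains S n &&
        decide (|pvGet arr n.1 n.2 - pvGet arr x y| ≤ target))) = true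
    · right
      refine ⟨hmem, ?_, ?_⟩
      · obtain ⟨u, hu_mem, hu_cond⟩ := List.any_eq_true.mp hany
        rw [Bool.and_eq_true, Bool.and_eq_true] at hu_cond
        obtain ⟨⟨hbnd, hcont⟩, habs⟩ := hu_cond
        refine ⟨u, ?_, ?_⟩
        · exact (PySem.Set.contains_iff ..).mp hcont
        · have hbnd' := of_decide_eq_true hbnd
          have habs' := of_decide_eq_true habs
          exact ⟨hbnd', hxy, (mem_nbrs u x y).mp hu_mem, habs'⟩
      · unfold sweep_cell
        rw [if_neg (fun h => hmem ((PySem.Set.contains_iff ..).mp h)), if_pos hany]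
        rw [show PySem.Set.add S (x, y) = S ++ [(x, y)] from by simp [PySem.Set.add, hmem]]
    · left
      unfold sweep_cell
      rw [if_neg (fun h => hmem ((PySem.Set.contains_iff ..).mp h)), if_neg hany]

lemma sweep_cell_complete (arr : List (List Int)) (target : Int)
    (S : PySem.Set (Int × Int)) (b : Bool) (x y : Int)
    (hres : sweep_cell arr target (arr.length : Int) ((arr.headD []).length : Int) (S, b) x y = (S, b))
    (hnot : (x, y) ∉ S) : ∀ u ∈ S, ¬ EdgeP arr target u (x, y) := by
  intro u hu he
  have hany : ((nbrs x y).any (fun n =>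
      decide (0 ≤ n.1 ∧ n.1 < (arr.length : Int) ∧ 0 ≤ n.2 ∧
        n.2 < ((arr.headD []).length : Int)) &&
      PySem.Set.contains S n &&
      decide (|pvGet arr n.1 n.2 - pvGet arr x y| ≤ target))) = true := by
    refine List.any_eq_true.mpr ⟨u, (mem_nbrs u x y).mpr ?_, ?_⟩
    · exact he.2.2.1
    · rw [Bool.and_eq_true, Bool.and_eq_true]
      refine ⟨⟨?_, (PySem.Set.contains_iff ..).mpr hu⟩, ?_⟩
      · rw [decide_eq_true_eq]
        exact he.1
      · rw [decide_eq_true_eq]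
        exact he.2.2.2
  have hres' : sweep_cell arr target (arr.length : Int) ((arr.headD []).length : Int) (S, b) x y
      = (S ++ [(x, y)], true) := by
    unfold sweep_cell
    rw [if_neg (fun h => hnot ((PySem.Set.contains_iff ..).mp h)), if_pos hany]
    rw [show PySem.Set.add S (x, y) = S ++ [(x, y)] from by simp [PySem.Set.add, hnot]]
  rw [hres'] at hres
  have := congrArg (fun p => p.1.length) hres
  simp at this

-- the two nested `for` loops as one fold over the flattened cell list
def cellsList (arr : List (List Int)) : List (Int × Int) :=
  (PySem.List.pyRange 0 (arr.length : Int) 1).flatMap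
    (fun x => (PySem.List.pyRange 0 ((arr.headD []).length : Int) 1).map (fun y => (x, y)))

lemma mem_cellsList (arr : List (List Int)) (c : Int × Int) :
    c ∈ cellsList arr ↔ InGrid arr c := by
  obtain ⟨a, b⟩ := c
  simp only [cellsList, List.mem_flatMap, List.mem_map, PySem.List.mem_pyRange_one, InGrid,
    Prod.ext_iff]
  constructor
  · rintro ⟨x, hx, y, hy, h1, h2⟩
    omega
  · rintro ⟨h1, h2, h3, h4⟩
    exact ⟨a, ⟨h1, h2⟩, b, ⟨h3, h4⟩, rfl, rfl⟩

lemma sweep_eq_fold (arr : List (List Int)) (target : Int) (S : PySem.Set (Int × Int)) :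
    sweep arr target (arr.length : Int) ((arr.headD []).length : Int) S =
      (cellsList arr).foldl
        (fun st p => sweep_cell arr target (arr.length : Int) ((arr.headD []).length : Int) st p.1 p.2)
        (S, false) := by
  have hgen : ∀ (l : List Int) (f : Int → List (Int × Int))
      (g : PySem.Set (Int × Int) × Bool → (Int × Int) → PySem.Set (Int × Int) × Bool)
      (init : PySem.Set (Int × Int) × Bool),
      (l.flatMap f).foldl g init = l.foldl (fun a x => (f x).foldl g a) init := by
    intro l f g init
    induction l generalizing init with
    | nil => rfl
    | cons x xs ih => simp [List.flatMap_cons, List.foldl_append, ih]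
  simp only [sweep, cellsList, hgen, List.foldl_map]

lemma sweep_fold_props (arr : List (List Int)) (target : Int) :
    ∀ (cells : List (Int × Int)), (∀ c ∈ cells, InGrid arr c) →
    ∀ (S : PySem.Set (Int × Int)) (b : Bool), S.Nodup →
      (∀ c ∈ S, InGrid arr c ∧ ReachP arr target c) →
    ∃ S' b',
      cells.foldl
        (fun st p => sweep_cell arr target (arr.length : Int) ((arr.headD []).length : Int) st p.1 p.2)
        (S, b) = (S', b') ∧
      (∃ new, S' = S ++ new) ∧ S'.Nodup ∧
      (∀ c ∈ S', InGrid arr c ∧ ReachP arr target c) ∧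
      (b = true → b' = true) ∧
      (b' = false → S' = S ∧ ∀ c ∈ cells, c ∉ S → ∀ u ∈ S, ¬ EdgeP arr target u c) ∧
      (b' = true → b = false → S.length < S'.length) := by
  intro cells
  induction cells with
  | nil =>
    intro _ S b hnd hSc
    refine ⟨S, b, rfl, ⟨[], by simp⟩, hnd, hSc, fun h => h, fun _ => ⟨rfl, by simp⟩, ?_⟩
    intro h1 h2
    rw [h1] at h2
    cases h2
  | cons p ps ih =>
    intro hcells S b hnd hSc
    have hp : InGrid arr p := hcells p (List.mem_cons_self ..)
    rcases sweep_cell_push arr target (S, b) p.1 p.2 hp with hun | hpush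
    · obtain ⟨S', b', h1, h2, h3, h4, h5, h6, h7⟩ :=
        ih (fun c hc => hcells c (List.mem_cons_of_mem _ hc)) S b hnd hSc
      refine ⟨S', b', ?_, h2, h3, h4, h5, ?_, h7⟩
      · rw [List.foldl_cons, hun]
        exact h1
      · intro hb'
        obtain ⟨hSS, hcl⟩ := h6 hb'
        refine ⟨hSS, ?_⟩
        intro c hc hcS u hu
        rcases List.mem_cons.mp hc with rfl | hc'
        · exact sweep_cell_complete arr target S b c.1 c.2 hun hcS u hu
        · exact hcl c hc' hcS u hu
    · obtain ⟨hnm, ⟨u, hu, hE⟩, hadd⟩ := hpush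
      have hnd1 : (S ++ [(p.1, p.2)]).Nodup := nodup_snoc _ _ hnd hnm
      have hSc1 : ∀ c ∈ S ++ [(p.1, p.2)], InGrid arr c ∧ ReachP arr target c := by
        intro c hc
        rcases List.mem_append.mp hc with h | h
        · exact hSc c h
        · rcases List.mem_singleton.mp h with rfl
          exact ⟨hp, Relation.ReflTransGen.tail (hSc u hu).2 hE⟩
      obtain ⟨S', b', h1, ⟨new, hnew⟩, h3, h4, h5, h6, h7⟩ :=
        ih (fun c hc => hcells c (List.mem_cons_of_mem _ hc)) (S ++ [(p.1, p.2)]) true hnd1 hSc1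
      have hb'true : b' = true := h5 rfl
      refine ⟨S', b', ?_, ⟨(p.1, p.2) :: new, by rw [hnew]; simp⟩, h3, h4, fun _ => hb'true, ?_, ?_⟩
      · rw [List.foldl_cons, hadd]
        exact h1
      · intro hb'
        rw [hb'true] at hb'
        cases hb'
      · intro _ _
        have : S'.length = S.length + 1 + new.length := by
          rw [hnew]
          simp
          omega
        omega

lemma sweep_loop_correct (arr : List (List Int)) (target : Int) :
    ∀ (fuel : Nat) (S : PySem.Set (Int × Int)), S.Nodup →
      (∀ c ∈ S, InGrid arr c ∧ ReachP arr target c) →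
      ((0 : Int), (0 : Int)) ∈ S →
      arr.length * (arr.headD []).length + 1 ≤ fuel + S.length →
      (goalCell arr ∈ sweep_loop arr target (arr.length : Int) ((arr.headD []).length : Int) fuel S
        ↔ ReachP arr target (goalCell arr)) := by
  intro fuel
  induction fuel with
  | zero =>
    intro S hnd hSc h0 hfuel
    exfalso
    have := length_le_grid arr S hnd (fun c hc => (hSc c hc).1)
    omega
  | succ fuel ih =>
    intro S hnd hSc h0 hfuel
    obtain ⟨S', b', hfold, ⟨new, hSnew⟩, hnd', hSc', _, hfalse, hinc⟩ :=
      sweep_fold_props arr target (cellsList arr)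
        (fun c hc => (mem_cellsList arr c).mp hc) S false hnd hSc
    have hsweep : sweep arr target (arr.length : Int) ((arr.headD []).length : Int) S = (S', b') := by
      rw [sweep_eq_fold]
      exact hfold
    cases b' with
    | false =>
      obtain ⟨hSS, hclosed⟩ := hfalse rfl
      have hres : sweep_loop arr target (arr.length : Int) ((arr.headD []).length : Int)
          (fuel + 1) S = S := by
        simp only [sweep_loop, hsweep]
        simp [hSS]
      rw [hres]
      constructor
      · intro h
        exact (hSc _ h).2
      · intro hreach
        refine reach_subset arr target S h0 ?_ _ hreach
        intro u v hu he
        by_cases hv : v ∈ S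
        · exact hv
        · exact absurd he (hclosed v ((mem_cellsList arr v).mpr he.2.1) hv u hu)
    | true =>
      have hres : sweep_loop arr target (arr.length : Int) ((arr.headD []).length : Int)
          (fuel + 1) S = sweep_loop arr target (arr.length : Int) ((arr.headD []).length : Int)
          fuel S' := by
        simp only [sweep_loop, hsweep]
        simp
      rw [hres]
      have hlen : S.length < S'.length := hinc rfl rfl
      refine ih S' hnd' hSc' ?_ (by omega)
      rw [hSnew]
      exact List.mem_append_left _ h0

-- ===== VERDICT (by name: the statement is the Claim_ definition above) =====
theorem can_reach_target_spec : Claim_equal_can_reach_target := by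
  intro arr target _ hpre
  obtain ⟨hne, hrowne, _⟩ := hpre
  have hR : 0 < arr.length :=
    Nat.pos_of_ne_zero (fun h => hne (List.eq_nil_of_length_eq_zero h))
  have hC : 0 < (arr.headD []).length :=
    Nat.pos_of_ne_zero (fun h => hrowne (List.eq_nil_of_length_eq_zero h))
  have hstart : InGrid arr ((0 : Int), (0 : Int)) := by
    refine ⟨le_refl 0, ?_, le_refl 0, ?_⟩
    · change (0 : Int) < (arr.length : Int)
      exact_mod_cast hR
    · change (0 : Int) < ((arr.headD []).length : Int)
      exact_mod_cast hC
  have hA : can_reach_target arr target = true ↔ ReachP arr target (goalCell arr) := by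
    unfold can_reach_target
    apply bfs_loop_correct arr target hR hC
    · refine ⟨List.nodup_nil, ?_, ?_, ?_, ?_⟩
      · intro c hc
        cases hc
      · intro c hc
        rcases List.mem_singleton.mp hc with rfl
        exact Or.inr rfl
      · intro v hv hnotin w he
        rcases hv with h | h
        · cases h
        · exact absurd (by rw [h]; exact List.mem_singleton.mpr rfl) hnotin
      · intro hg
        rcases hg with h | h
        · cases h
        · rw [h]
          exact List.mem_singleton.mpr rfl
    · simp only [List.length_cons, List.length_nil]
      omega
  have hS0 : PySem.Set.add PySem.Set.empty ((0 : Int), (0 : Int)) = [((0 : Int), (0 : Int))] := rfl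
  have hB : can_reach_target_alt arr target = true ↔ ReachP arr target (goalCell arr) := by
    have halt : can_reach_target_alt arr target =
        PySem.Set.contains
          (sweep_loop arr target (arr.length : Int) ((arr.headD []).length : Int)
            (arr.length * (arr.headD []).length + 1) [((0 : Int), (0 : Int))])
          (goalCell arr) := rfl
    rw [halt, PySem.Set.contains_iff]
    apply sweep_loop_correct arr target
    · exact List.nodup_singleton _
    · intro c hc
      rcases List.mem_singleton.mp hc with rfl
      exact ⟨hstart, Relation.ReflTransGen.refl⟩
    · exact List.mem_singleton.mpr rfl
    · simp only [List.length_cons, List.length_nil]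
      omega
  unfold Spec_can_reach_target
  rw [Bool.eq_iff_iff, hA, hB]
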